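-- pv_equiv track=rewrite | github.com/djordje-djokovic/research_loom | matrix/reporting.py | summarize_matrix_results
-- ===== SOURCE A (Python) =====
-- from typing import Any, Dict, Iterable
--
-- def summarize_matrix_results(rows: Iterable[Dict[str, Any]]) -> Dict[str, Any]:
--     total = 0
--     ok = 0
--     error = 0
--     for row in rows:
--         total += 1
--         if row.get("status") == "ok":
--             ok += 1
--         else:
--             error += 1
--     return {"n_total": total, "n_ok": ok, "n_error": error}
-- ===== SOURCE B (Python) =====
-- from typing import Any, Dict, Iterable
--
-- def summarize_matrix_results(rows: Iterable[Dict[str, Any]]) -> Dict[str, Any]: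
--     # Build a histogram of status values, then read all three fields off it.
--     freq: Dict[Any, int] = {}
--     for row in rows:
--         s = row.get("status")
--         freq[s] = freq.get(s, 0) + 1
--     total = sum(freq.values())
--     ok = freq.get("ok", 0)
--     return {"n_total": total, "n_ok": ok, "n_error": total - ok}
-- ===== Notes on version B (the rewrite author's own statement) =====
-- stated objective: alternative
-- what changed: B builds a frequency histogram of the status values (a dict keyed by status) and derives all three fields from it (total = sum of the histogram's counts, ok = histogram lookup of 'ok', error = total - ok) instead of incrementing three counters per row in a branch.
import Mathlib
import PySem

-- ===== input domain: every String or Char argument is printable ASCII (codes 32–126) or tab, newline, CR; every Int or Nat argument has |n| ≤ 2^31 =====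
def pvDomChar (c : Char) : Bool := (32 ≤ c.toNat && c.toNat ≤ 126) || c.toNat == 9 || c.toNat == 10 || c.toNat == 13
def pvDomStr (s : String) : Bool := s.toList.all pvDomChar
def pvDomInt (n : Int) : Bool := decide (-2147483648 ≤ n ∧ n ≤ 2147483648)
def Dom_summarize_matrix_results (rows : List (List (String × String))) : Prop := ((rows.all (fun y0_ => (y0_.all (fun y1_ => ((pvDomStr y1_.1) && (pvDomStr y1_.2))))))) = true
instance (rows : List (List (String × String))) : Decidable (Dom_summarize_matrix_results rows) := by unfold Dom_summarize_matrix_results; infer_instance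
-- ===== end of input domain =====

-- B builds a frequency histogram of the status values and derives all three fields from it; objective: alternative.

-- row.get("status"): first match in the association list (dict lookup)
def rowStatus (row : List (String × String)) : Option String :=
  (row.find? (fun p => p.1 == "status")).map (·.2)

-- ===== PORT A =====
-- A's loop body: three counters incremented per row, branch on status
def smrStep (acc : Int × Int × Int) (row : List (String × String)) : Int × Int × Int :=
  if rowStatus row == some "ok" then (acc.1 + 1, acc.2.1 + 1, acc.2.2)
  else (acc.1 + 1, acc.2.1, acc.2.2 + 1)

def summarize_matrix_results (rows : List (List (String × String))) : List (String × Int) :=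
  let s := rows.foldl smrStep (0, 0, 0)
  [("n_total", s.1), ("n_ok", s.2.1), ("n_error", s.2.2)]

-- ===== PORT B =====
-- B: histogram of status values (freq[s] = freq.get(s, 0) + 1), then
-- total = sum(freq.values()), ok = freq.get("ok", 0), error = total - ok
def summarize_matrix_results_alt (rows : List (List (String × String))) : List (String × Int) :=
  let freq : PySem.Dict (Option String) Int :=
    rows.foldl (fun d row =>
      let s := rowStatus row
      d.insert s (d.getD s 0 + 1)) PySem.Dict.empty
  let total : Int := freq.values.sum
  let ok : Int := freq.getD (some "ok") 0
  [("n_total", total), ("n_ok", ok), ("n_error", total - ok)]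

-- ===== PRECONDITION & SPEC =====
def Spec_summarize_matrix_results (rows : List (List (String × String))) (out : List (String × Int)) : Prop := out = summarize_matrix_results_alt rows
instance (rows : List (List (String × String))) (out : List (String × Int)) : Decidable (Spec_summarize_matrix_results rows out) := by unfold Spec_summarize_matrix_results; infer_instance

-- ===== CLAIM =====
def Claim_equal_summarize_matrix_results : Prop := ∀ (rows : List (List (String × String))), Dom_summarize_matrix_results rows → Spec_summarize_matrix_results rows (summarize_matrix_results rows)

-- ===== LEMMAS AND PROOFS =====

-- A's fold: total = length, ok = filter-count, error = total - ok
lemma smr_fold_inv (rows : List (List (String × String))) (t o e : Int) :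
    rows.foldl smrStep (t, o, e)
    = (t + rows.length,
       o + (rows.filter (fun row => rowStatus row == some "ok")).length,
       e + (rows.length - (rows.filter (fun row => rowStatus row == some "ok")).length)) := by
  induction rows generalizing t o e with
  | nil => simp
  | cons r rest ih =>
    rw [List.foldl_cons, List.filter_cons]
    by_cases h : (rowStatus r == some "ok") = true
    · rw [show smrStep (t, o, e) r = (t + 1, o + 1, e) by simp [smrStep, h], ih]
      simp [h, Prod.ext_iff]
      omega
    · rw [show smrStep (t, o, e) r = (t + 1, o, e + 1) by simp [smrStep, h], ih]
      simp [h, Prod.ext_iff]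
      omega

-- B's histogram is Counter(map rowStatus rows)
lemma freq_eq_counter (rows : List (List (String × String))) :
    rows.foldl (fun (d : PySem.Dict (Option String) Int) row =>
      let s := rowStatus row
      d.insert s (d.getD s 0 + 1)) PySem.Dict.empty
    = PySem.Dict.counter (rows.map rowStatus) := by
  rw [← PySem.Dict.foldl_insert_getD_add_one_eq_counter, List.foldl_map]

-- List.count is the same under any lawful BEq instance
lemma count_beq_eq {α : Type} [DecidableEq α] (i : BEq α) [li : @LawfulBEq α i]
    (k : α) (l : List α) : @List.count α i k l = @List.count α instBEqOfDecidableEq k l := by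
  unfold List.count
  apply List.countP_congr
  intro a _
  by_cases h : a = k <;> simp [h]

-- sum of the counts over a nodup list covering xs = length of xs
lemma sum_counts {α : Type} [DecidableEq α] (u xs : List α)
    (hu : u.Nodup) (h : ∀ a, a ∈ u ↔ a ∈ xs) :
    (u.map (fun k => (xs.count k : Int))).sum = (xs.length : Int) := by
  have h2 : u.toFinset = xs.toFinset := by ext a; simp [h a]
  have h1 : (u.map (fun k => (xs.count k : Int))).sum
      = ∑ a ∈ u.toFinset, (xs.count a : Int) := by
    rw [Finset.sum_list_map_count]
    refine Finset.sum_congr rfl ?_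
    intro x hx
    rw [List.count_eq_one_of_mem hu (List.mem_toFinset.mp hx)]
    simp
  have h4 : ∑ a ∈ xs.toFinset, xs.count a = xs.length := by
    simpa using Multiset.toFinset_sum_count_eq (xs : Multiset α)
  rw [h1, h2, ← Nat.cast_sum, h4]

-- the same with counts taken under any lawful BEq instance
lemma sum_counts_beq {α : Type} [DecidableEq α] (i : BEq α) [li : @LawfulBEq α i]
    (u xs : List α) (hu : u.Nodup) (h : ∀ a, a ∈ u ↔ a ∈ xs) :
    (u.map (fun k => ((@List.count α i k xs : Nat) : Int))).sum = (xs.length : Int) := by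
  have hm : u.map (fun k => ((@List.count α i k xs : Nat) : Int))
      = u.map (fun k => ((@List.count α instBEqOfDecidableEq k xs : Nat) : Int)) := by
    apply List.map_congr_left
    intro k _
    exact congrArg _ (count_beq_eq i k xs)
  rw [hm]
  exact sum_counts u xs hu h

theorem summarize_matrix_results_spec : Claim_equal_summarize_matrix_results := by
  intro rows _
  unfold Spec_summarize_matrix_results summarize_matrix_results summarize_matrix_results_alt
  rw [smr_fold_inv, freq_eq_counter]
  have hok : (PySem.Dict.counter (rows.map rowStatus)).getD (some "ok") 0
      = ((rows.filter (fun row => rowStatus row == some "ok")).length : Int) := by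
    rw [PySem.Dict.getD_counter]
    rw [List.count, List.countP_map, List.countP_eq_length_filter]
    rfl
  have hsum : (PySem.Dict.counter (rows.map rowStatus)).values.sum
      = ((rows.map rowStatus).length : Int) := by
    have hv : (PySem.Dict.counter (rows.map rowStatus)).values
        = (PySem.Set.ofList (rows.map rowStatus)).map
            (fun k => ((rows.map rowStatus).count k : Int)) := by
      simp [PySem.Dict.values, PySem.Dict.items_counter]
    rw [hv]
    exact sum_counts_beq _ (PySem.Set.ofList (rows.map rowStatus)) (rows.map rowStatus)
      (PySem.Set.nodup_ofList (rows.map rowStatus))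
      (fun a => PySem.Set.mem_ofList (rows.map rowStatus) a)
  simp only [hok, hsum, List.length_map]
  simp
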